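-- pv_equiv track=rewrite | github.com/vallmeister/Programming | src/leetcode/2530_maximal_score_after_applying_k_operations.py | maxKelements
-- ===== SOURCE A (Python) =====
-- from heapq import heapify, heappop, heappush
-- from math import ceil
-- from typing import List
--
-- def maxKelements(nums: List[int], k: int) -> int:
--     nums = [-num for num in nums]
--     heapify(nums)
--     score = 0
--     for _ in range(k):
--         element = heappop(nums)
--         score -= element
--         heappush(nums, -ceil(abs(element) / 3))
--     return score
-- ===== SOURCE B (Python) =====
-- def maxKelements(nums, k):
--     # Heap-free re-implementation: repeated linear max-scan on a plain list copy.
--     vals = list(nums)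
--     score = 0
--     for _ in range(k):
--         m = max(vals)
--         i = vals.index(m)
--         score += m
--         vals[i] = (abs(m) + 2) // 3   # == ceil(abs(m) / 3) exactly for integers
--     return score
-- ===== Notes on version B (the rewrite author's own statement) =====
-- stated objective: simpler
-- what changed: Replaces the negated min-heap (heapify/heappop/heappush) with a plain list and k repeated linear max-scans: each round takes max(vals), adds it to the score, and overwrites its first occurrence with ceil(abs(m)/3) computed in exact integer arithmetic.
import Mathlib
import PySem

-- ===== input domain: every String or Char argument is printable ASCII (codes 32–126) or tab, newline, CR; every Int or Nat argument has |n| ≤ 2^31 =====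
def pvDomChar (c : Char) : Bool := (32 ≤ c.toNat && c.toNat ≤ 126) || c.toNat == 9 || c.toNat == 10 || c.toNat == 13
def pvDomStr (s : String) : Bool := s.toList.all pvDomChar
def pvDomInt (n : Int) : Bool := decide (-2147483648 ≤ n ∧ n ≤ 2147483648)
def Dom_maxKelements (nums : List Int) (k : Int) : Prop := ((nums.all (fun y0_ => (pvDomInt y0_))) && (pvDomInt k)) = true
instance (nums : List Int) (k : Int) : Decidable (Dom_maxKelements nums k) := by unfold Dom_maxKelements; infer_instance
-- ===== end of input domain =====

-- B replaces A's heap with k linear max-scans over a plain list (simpler, no heapq); same return value.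
-- A rebinds `nums` to a fresh list, so neither version mutates the caller's argument.

-- ===== PORT A =====
-- CPython's heapq module is not covered by PySem, so heapify/heappop/heappush are ported by
-- hand below, step for step from CPython Lib/heapq.py (_siftdown, _siftup, heapify, heappush,
-- heappop); exact on in-range indices, which is all these private-list operations ever use.

-- (pos - 1) >> 1, the parent index
def pyPar (j : Nat) : Nat := (j - 1) / 2

-- the while-loop of heapq._siftdown: bubble the hole at `pos` up towards `startpos`;
-- returns the updated list and the final hole position (heap[pos] = newitem is done by the caller)
def pySiftdownLoop (heap : List Int) (startpos pos : Nat) (newitem : Int) : List Int × Nat :=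
  if _h : startpos < pos then
    let parent := heap.getD (pyPar pos) 0
    if newitem < parent then pySiftdownLoop (heap.set pos parent) startpos (pyPar pos) newitem
    else (heap, pos)
  else (heap, pos)
termination_by pos
decreasing_by simp only [pyPar]; omega

-- heapq._siftdown
def pySiftdown (heap : List Int) (startpos pos : Nat) : List Int :=
  let newitem := heap.getD pos 0
  let r := pySiftdownLoop heap startpos pos newitem
  r.1.set r.2 newitem

-- the while-loop of heapq._siftup: move the smaller child up until reaching a leaf
def pySiftupLoop (heap : List Int) (pos childpos endpos : Nat) : List Int × Nat :=
  if _h : childpos < endpos then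
    let c := if childpos + 1 < endpos ∧ ¬ heap.getD childpos 0 < heap.getD (childpos + 1) 0
             then childpos + 1 else childpos
    pySiftupLoop (heap.set pos (heap.getD c 0)) c (2 * c + 1) endpos
  else (heap, pos)
termination_by endpos - childpos
decreasing_by split <;> omega

-- heapq._siftup
def pySiftup (heap : List Int) (pos : Nat) : List Int :=
  let newitem := heap.getD pos 0
  let r := pySiftupLoop heap pos (2 * pos + 1) heap.length
  pySiftdown (r.1.set r.2 newitem) pos r.2

-- heapq.heapify: for i in reversed(range(n//2)): _siftup(x, i)
def pyHeapify (x : List Int) : List Int :=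
  (List.range (x.length / 2)).reverse.foldl (fun h i => pySiftup h i) x

-- heapq.heappush: heap.append(item); _siftdown(heap, 0, len(heap)-1)
def pyHeappush (heap : List Int) (item : Int) : List Int :=
  pySiftdown (heap ++ [item]) 0 heap.length

-- heapq.heappop; heap.pop() raises IndexError on [] (outside Pre_), hence the getD defaults
def pyHeappop (heap : List Int) : Int × List Int :=
  let lastelt := heap.getLast?.getD 0
  let rest := heap.dropLast
  if rest.isEmpty then (lastelt, rest)
  else (rest.getD 0 0, pySiftup (rest.set 0 lastelt) 0)

-- the body of A's `for _ in range(k)` loop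
-- -ceil(abs(element) / 3): math.ceil of the float quotient; exact integer form (|e| + 2) // 3
-- (the float division is exact enough for |e| ≤ 2^31, where the two agree)
def pyStepA (st : List Int × Int) : List Int × Int :=
  let p := pyHeappop st.1
  (pyHeappush p.2 (-(PySem.Int.floordiv (|p.1| + 2) 3)), st.2 - p.1)

def maxKelements (nums : List Int) (k : Int) : Int :=
  ((PySem.List.pyRange 0 k 1).foldl (fun st _ => pyStepA st)
    (pyHeapify (nums.map (fun num => -num)), 0)).2

-- ===== PORT B =====
-- the body of B's `for _ in range(k)` loop: m = max(vals); i = vals.index(m);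
-- score += m; vals[i] = (abs(m) + 2) // 3.  max(vals) raises ValueError on [] (outside
-- Pre_), hence the getD defaults; `i` is a valid index, so List.set is exact.
def pyStepB (st : List Int × Int) : List Int × Int :=
  let m := ((PySem.List.max? st.1 (fun y => y)).getD 0)
  ((st.1.set ((PySem.List.index? st.1 m).getD 0) (PySem.Int.floordiv (|m| + 2) 3)), st.2 + m)

def maxKelements_alt (nums : List Int) (k : Int) : Int :=
  ((PySem.List.pyRange 0 k 1).foldl (fun st _ => pyStepB st) (nums, 0)).2

-- ===== PRECONDITION & SPEC =====
-- Pre_ excludes only nums = [] with k > 0, where A's heappop raises IndexError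
-- (and B's max([]) raises ValueError).
def Pre_maxKelements (nums : List Int) (k : Int) : Prop := nums ≠ [] ∨ k ≤ 0
instance (nums : List Int) (k : Int) : Decidable (Pre_maxKelements nums k) := by
  unfold Pre_maxKelements; infer_instance

def pvWitness_maxKelements : List Int × Int := ([5, 4], 2)

def Spec_maxKelements (nums : List Int) (k : Int) (out : Int) : Prop := out = maxKelements_alt nums k
instance (nums : List Int) (k : Int) (out : Int) : Decidable (Spec_maxKelements nums k out) := by unfold Spec_maxKelements; infer_instance

-- ===== CLAIM (what is proved, stated in full; the proofs are below) =====
def Claim_equal_maxKelements : Prop := ∀ (nums : List Int) (k : Int), Dom_maxKelements nums k → Pre_maxKelements nums k → Spec_maxKelements nums k (maxKelements nums k)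

-- ===== LEMMAS AND PROOFS =====

-- "i is an ancestor of j" in the implicit binary-tree indexing
def anc (i j : Nat) : Prop := ∃ m, pyPar^[m] j = i

-- heap order on every edge whose parent index is ≥ i
def InvH (h : List Int) (n i : Nat) : Prop :=
  ∀ j, 0 < j → j < n → i ≤ pyPar j → h.getD (pyPar j) 0 ≤ h.getD j 0

-- heap order inside the subtree rooted at `root`, except on edges incident to the hole `pos`
def HeapBelowX (h : List Int) (n root pos : Nat) : Prop :=
  ∀ j, 0 < j → j < n → j ≠ root → j ≠ pos → pyPar j ≠ pos → anc root j →
    h.getD (pyPar j) 0 ≤ h.getD j 0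

-- heap order inside the subtree rooted at `root`
def HeapBelow (h : List Int) (n root : Nat) : Prop :=
  ∀ j, 0 < j → j < n → j ≠ root → anc root j → h.getD (pyPar j) 0 ≤ h.getD j 0

def IsHeap (h : List Int) : Prop := InvH h h.length 0


theorem pyPar_lt {j : Nat} (h : 0 < j) : pyPar j < j := by unfold pyPar; omega

theorem anc_refl (i : Nat) : anc i i := ⟨0, rfl⟩

theorem pyPar_iter_le (m j : Nat) : pyPar^[m] j ≤ j := by
  induction m generalizing j with
  | zero => simp
  | succ m ih =>
    rw [Function.iterate_succ_apply]
    exact le_trans (ih _) (by unfold pyPar; omega)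

theorem anc_le {i j : Nat} (h : anc i j) : i ≤ j := by
  obtain ⟨m, hm⟩ := h
  rw [← hm]; exact pyPar_iter_le m j

theorem anc_par {i j : Nat} (h : anc i j) (hne : j ≠ i) : anc i (pyPar j) := by
  obtain ⟨m, hm⟩ := h
  cases m with
  | zero => exact absurd hm hne
  | succ m => exact ⟨m, by rw [← Function.iterate_succ_apply]; exact hm⟩

theorem anc_child {i j c : Nat} (h : anc i j) (hc : pyPar c = j) : anc i c := by
  obtain ⟨m, hm⟩ := h
  exact ⟨m + 1, by rw [Function.iterate_succ_apply, hc]; exact hm⟩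

theorem anc_zero (j : Nat) : anc 0 j := by
  induction j using Nat.strong_induction_on with
  | _ j ih =>
    rcases Nat.eq_zero_or_pos j with h | h
    · subst h; exact anc_refl 0
    · exact anc_child (ih (pyPar j) (pyPar_lt h)) rfl

theorem getD_set_self {h : List Int} {i : Nat} (v : Int) (hi : i < h.length) :
    (h.set i v).getD i 0 = v := by
  simp [List.getD, List.getElem?_set_self hi]

theorem getD_set_ne {h : List Int} {i j : Nat} (v : Int) (hij : i ≠ j) :
    (h.set i v).getD j 0 = h.getD j 0 := by
  simp [List.getD, List.getElem?_set_ne hij]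

theorem getD_append_left {h : List Int} {x : Int} {j : Nat} (hj : j < h.length) :
    (h ++ [x]).getD j 0 = h.getD j 0 := by
  simp [List.getD, List.getElem?_append_left hj]

theorem set_getD_self {h : List Int} {i : Nat} (hi : i < h.length) :
    h.set i (h.getD i 0) = h := by
  apply List.ext_getElem
  · simp
  · intro j hj hj'
    by_cases hij : i = j
    · subst hij; simp [List.getD, List.getElem?_eq_getElem hi]
    · simp [List.getElem_set_ne hij]

theorem count_set_add (l : List Int) (i : Nat) (v a : Int) (hi : i < l.length) :
    (l.set i v).count a + (if l.getD i 0 = a then 1 else 0) =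
      l.count a + (if v = a then 1 else 0) := by
  induction l generalizing i with
  | nil => simp at hi
  | cons x t ih =>
    cases i with
    | zero =>
      simp [List.count_cons, List.getD]
      split_ifs <;> simp_all
    | succ i =>
      have := ih i (by simpa using hi)
      simp only [List.set_cons_succ, List.count_cons, List.getD_cons_succ] at *
      split_ifs at * <;> simp_all

theorem set_move_perm (h : List Int) (i j : Nat) (v : Int) (hij : i ≠ j)
    (hi : i < h.length) (hj : j < h.length) :
    ((h.set i (h.getD j 0)).set j v).Perm (h.set i v) := by
  rw [List.perm_iff_count]; intro a
  have c1 := count_set_add (h.set i (h.getD j 0)) j v a (by simpa using hj)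
  have c2 := count_set_add h i (h.getD j 0) a hi
  have c3 := count_set_add h i v a hi
  rw [getD_set_ne _ hij] at c1
  split_ifs at c1 c2 c3 <;> omega

theorem set_perm_eraseIdx (l : List Int) (i : Nat) (v : Int) (hi : i < l.length) :
    (l.set i v).Perm (v :: l.eraseIdx i) := by
  induction l generalizing i with
  | nil => simp at hi
  | cons x t ih =>
    cases i with
    | zero => simp
    | succ i =>
      have := ih i (by simpa using hi)
      simp only [List.set_cons_succ, List.eraseIdx_cons_succ]
      exact ((this).cons x).trans (List.Perm.swap _ _ _)

theorem perm_getD_eraseIdx (l : List Int) (i : Nat) (hi : i < l.length) :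
    l.Perm (l.getD i 0 :: l.eraseIdx i) := by
  have := set_perm_eraseIdx l i (l.getD i 0) hi
  rw [set_getD_self hi] at this
  exact this


-- spec of the _siftdown while-loop: the hole walks up inside the subtree of `startpos`;
-- setting the final hole gives the same multiset as setting the initial one, positions
-- outside the subtree are untouched, and filling the hole with `newitem` restores heap
-- order on the whole subtree
theorem siftdownLoop_spec (pos : Nat) (heap : List Int) (startpos : Nat) (newitem : Int)
    (hlen : pos < heap.length)
    (hanc : anc startpos pos)
    (Ha : HeapBelowX heap heap.length startpos pos)
    (Hc1 : ∀ c, pyPar c = pos → 0 < c → c < heap.length → newitem ≤ heap.getD c 0)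
    (Hc2 : startpos < pos → ∀ c, pyPar c = pos → 0 < c → c < heap.length →
      heap.getD (pyPar pos) 0 ≤ heap.getD c 0) :
    (pySiftdownLoop heap startpos pos newitem).1.length = heap.length ∧
    (pySiftdownLoop heap startpos pos newitem).2 < heap.length ∧
    anc startpos (pySiftdownLoop heap startpos pos newitem).2 ∧
    (∀ v, ((pySiftdownLoop heap startpos pos newitem).1.set
        (pySiftdownLoop heap startpos pos newitem).2 v).Perm (heap.set pos v)) ∧
    (∀ j, ¬ anc startpos j →
      (pySiftdownLoop heap startpos pos newitem).1.getD j 0 = heap.getD j 0) ∧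
    HeapBelow ((pySiftdownLoop heap startpos pos newitem).1.set
      (pySiftdownLoop heap startpos pos newitem).2 newitem) heap.length startpos := by
  induction pos using Nat.strong_induction_on generalizing heap with
  | _ pos ih =>
  by_cases hsp : startpos < pos
  · by_cases hlt : newitem < heap.getD (pyPar pos) 0
    · -- loop step: move parent down into the hole, hole moves to pyPar pos
      have hppos : pyPar pos < pos := pyPar_lt (by omega)
      have hunf : pySiftdownLoop heap startpos pos newitem =
          pySiftdownLoop (heap.set pos (heap.getD (pyPar pos) 0)) startpos (pyPar pos) newitem := by
        conv_lhs => rw [pySiftdownLoop]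
        simp only [dif_pos hsp, if_pos hlt]
      have hanc' : anc startpos (pyPar pos) := anc_par hanc (by omega)
      have hsple : startpos ≤ pyPar pos := anc_le hanc'
      -- hypotheses for the recursive call on heap' := heap.set pos parent
      have hlen' : pyPar pos < (heap.set pos (heap.getD (pyPar pos) 0)).length := by
        simp; omega
      have Ha' : HeapBelowX (heap.set pos (heap.getD (pyPar pos) 0))
          (heap.set pos (heap.getD (pyPar pos) 0)).length startpos (pyPar pos) := by
        intro j h0 hjn hjroot hjne hparne hancj
        simp only [List.length_set] at hjn
        by_cases hjpos : j = pos
        · exact absurd (hjpos ▸ rfl) hparne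
        · by_cases hpj : pyPar j = pos
          · rw [hpj, getD_set_self _ hlen, getD_set_ne _ (Ne.symm hjpos)]
            exact Hc2 hsp j hpj h0 hjn
          · rw [getD_set_ne _ (fun h => hpj h.symm), getD_set_ne _ (Ne.symm hjpos)]
            exact Ha j h0 hjn hjroot hjpos hpj hancj
      have Hc1' : ∀ c, pyPar c = pyPar pos → 0 < c →
          c < (heap.set pos (heap.getD (pyPar pos) 0)).length →
          newitem ≤ (heap.set pos (heap.getD (pyPar pos) 0)).getD c 0 := by
        intro c hc h0 hcn
        simp only [List.length_set] at hcn
        by_cases hcpos : c = pos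
        · subst hcpos; rw [getD_set_self _ hlen]; exact le_of_lt hlt
        · rw [getD_set_ne _ (Ne.symm hcpos)]
          have hclt : pyPar pos < c := hc ▸ pyPar_lt h0
          have := Ha c h0 hcn (by omega) hcpos (by omega) (anc_child hanc' hc)
          rw [hc] at this
          omega
      have Hc2' : startpos < pyPar pos → ∀ c, pyPar c = pyPar pos → 0 < c →
          c < (heap.set pos (heap.getD (pyPar pos) 0)).length →
          (heap.set pos (heap.getD (pyPar pos) 0)).getD (pyPar (pyPar pos)) 0 ≤
            (heap.set pos (heap.getD (pyPar pos) 0)).getD c 0 := by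
        intro hsp' c hc h0 hcn
        simp only [List.length_set] at hcn
        have hgp : pyPar (pyPar pos) < pyPar pos := pyPar_lt (by omega)
        have hgne : pyPar (pyPar pos) ≠ pos := by omega
        have hP : heap.getD (pyPar (pyPar pos)) 0 ≤ heap.getD (pyPar pos) 0 :=
          Ha (pyPar pos) (by omega) (by omega) (by omega) (by omega) (by omega) hanc'
        rw [getD_set_ne _ (Ne.symm hgne)]
        by_cases hcpos : c = pos
        · subst hcpos; rw [getD_set_self _ hlen]; exact hP
        · rw [getD_set_ne _ (Ne.symm hcpos)]
          have hclt : pyPar pos < c := hc ▸ pyPar_lt h0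
          have h2 := Ha c h0 hcn (by omega) hcpos (by omega) (anc_child hanc' hc)
          rw [hc] at h2
          omega
      obtain ⟨l1, l2, l3, l4, l5, l6⟩ :=
        ih (pyPar pos) hppos (heap.set pos (heap.getD (pyPar pos) 0)) hlen' hanc' Ha' Hc1' Hc2'
      rw [List.length_set] at l1 l2 l6
      rw [hunf]
      refine ⟨l1, l2, l3, ?_, ?_, l6⟩
      · intro v
        exact (l4 v).trans (set_move_perm heap pos (pyPar pos) v (by omega) hlen (by omega))
      · intro j hj
        rw [l5 j hj, getD_set_ne _ (fun h => hj (by rw [← h]; exact hanc))]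
    · -- loop exit: newitem ≥ parent
      have hunf : pySiftdownLoop heap startpos pos newitem = (heap, pos) := by
        rw [pySiftdownLoop]; simp only [dif_pos hsp, if_neg hlt]
      rw [hunf]
      refine ⟨rfl, hlen, hanc, fun v => List.Perm.refl _, fun j _ => rfl, ?_⟩
      intro j h0 hjn hjroot hancj
      dsimp only at *
      by_cases hjpos : j = pos
      · subst hjpos
        rw [getD_set_self _ hlen, getD_set_ne _ (by have := pyPar_lt h0; omega)]
        omega
      · by_cases hpj : pyPar j = pos
        · rw [hpj, getD_set_self _ hlen, getD_set_ne _ (Ne.symm hjpos)]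
          exact Hc1 j hpj h0 hjn
        · rw [getD_set_ne _ (fun h => hpj h.symm), getD_set_ne _ (Ne.symm hjpos)]
          exact Ha j h0 hjn hjroot hjpos hpj hancj
  · -- loop never entered: pos = startpos
    have hpeq : pos = startpos := le_antisymm (by omega) (anc_le hanc)
    have hunf : pySiftdownLoop heap startpos pos newitem = (heap, pos) := by
      rw [pySiftdownLoop]; simp only [dif_neg hsp]
    rw [hunf]
    refine ⟨rfl, hlen, hanc, fun v => List.Perm.refl _, fun j _ => rfl, ?_⟩
    intro j h0 hjn hjroot hancj
    dsimp only at *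
    have hjpos : j ≠ pos := hpeq ▸ hjroot
    by_cases hpj : pyPar j = pos
    · rw [hpj, getD_set_self _ hlen, getD_set_ne _ (Ne.symm hjpos)]
      exact Hc1 j hpj h0 hjn
    · rw [getD_set_ne _ (fun h => hpj h.symm), getD_set_ne _ (Ne.symm hjpos)]
      exact Ha j h0 hjn hjroot hjpos hpj hancj

-- spec of heapq._siftdown: a permutation of its input that restores heap order on the
-- subtree of `startpos`, provided the children of the hole `pos` already dominate heap[pos]
theorem siftdown_spec (heap : List Int) (startpos pos : Nat)
    (hlen : pos < heap.length) (hanc : anc startpos pos)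
    (Ha : HeapBelowX heap heap.length startpos pos)
    (Hc1 : ∀ c, pyPar c = pos → 0 < c → c < heap.length → heap.getD pos 0 ≤ heap.getD c 0)
    (Hc2 : startpos < pos → ∀ c, pyPar c = pos → 0 < c → c < heap.length →
      heap.getD (pyPar pos) 0 ≤ heap.getD c 0) :
    (pySiftdown heap startpos pos).length = heap.length ∧
    (pySiftdown heap startpos pos).Perm heap ∧
    (∀ j, ¬ anc startpos j → (pySiftdown heap startpos pos).getD j 0 = heap.getD j 0) ∧
    HeapBelow (pySiftdown heap startpos pos) heap.length startpos := by
  obtain ⟨l1, l2, l3, l4, l5, l6⟩ :=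
    siftdownLoop_spec pos heap startpos (heap.getD pos 0) hlen hanc Ha Hc1 Hc2
  unfold pySiftdown
  dsimp only

  refine ⟨by simp only [List.length_set]; exact l1, ?_, ?_, l6⟩
  · have h := l4 (heap.getD pos 0)
    rw [set_getD_self hlen] at h; exact h
  · intro j hj
    rw [getD_set_ne _ (fun h => hj (by rw [← h]; exact l3)), l5 j hj]

-- the loop-exit facts of the _siftup while-loop (childpos ≥ endpos: `pos` is a leaf)
theorem siftupLoop_exit (heap : List Int) (root pos childpos : Nat)
    (hc : ¬ childpos < heap.length)
    (hlen : pos < heap.length) (hchild : childpos = 2 * pos + 1)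
    (hanc : anc root pos)
    (Ka : HeapBelowX heap heap.length root pos)
    (Kb : root < pos → ∀ c, pyPar c = pos → 0 < c → c < heap.length →
      heap.getD (pyPar pos) 0 ≤ heap.getD c 0) :
    (pySiftupLoop heap pos childpos heap.length).1.length = heap.length ∧
    (pySiftupLoop heap pos childpos heap.length).2 < heap.length ∧
    anc root (pySiftupLoop heap pos childpos heap.length).2 ∧
    heap.length ≤ 2 * (pySiftupLoop heap pos childpos heap.length).2 + 1 ∧
    (∀ v, ((pySiftupLoop heap pos childpos heap.length).1.set
        (pySiftupLoop heap pos childpos heap.length).2 v).Perm (heap.set pos v)) ∧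
    (∀ j, ¬ anc root j →
      (pySiftupLoop heap pos childpos heap.length).1.getD j 0 = heap.getD j 0) ∧
    HeapBelowX (pySiftupLoop heap pos childpos heap.length).1 heap.length root
      (pySiftupLoop heap pos childpos heap.length).2 ∧
    (root < (pySiftupLoop heap pos childpos heap.length).2 →
      ∀ c, pyPar c = (pySiftupLoop heap pos childpos heap.length).2 → 0 < c →
        c < heap.length →
        (pySiftupLoop heap pos childpos heap.length).1.getD
          (pyPar (pySiftupLoop heap pos childpos heap.length).2) 0 ≤
          (pySiftupLoop heap pos childpos heap.length).1.getD c 0) := by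
  have hunf : pySiftupLoop heap pos childpos heap.length = (heap, pos) := by
    rw [pySiftupLoop]; simp only [dif_neg hc]
  rw [hunf]
  exact ⟨rfl, hlen, hanc, by omega, fun v => List.Perm.refl _, fun j _ => rfl, Ka, Kb⟩

-- spec of the _siftup while-loop: the hole walks down to a leaf along the smaller children
theorem siftupLoop_spec (d : Nat) (heap : List Int) (root pos childpos : Nat)
    (hd : heap.length - childpos ≤ d)
    (hlen : pos < heap.length) (hchild : childpos = 2 * pos + 1)
    (hanc : anc root pos)
    (Ka : HeapBelowX heap heap.length root pos)
    (Kb : root < pos → ∀ c, pyPar c = pos → 0 < c → c < heap.length →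
      heap.getD (pyPar pos) 0 ≤ heap.getD c 0) :
    (pySiftupLoop heap pos childpos heap.length).1.length = heap.length ∧
    (pySiftupLoop heap pos childpos heap.length).2 < heap.length ∧
    anc root (pySiftupLoop heap pos childpos heap.length).2 ∧
    heap.length ≤ 2 * (pySiftupLoop heap pos childpos heap.length).2 + 1 ∧
    (∀ v, ((pySiftupLoop heap pos childpos heap.length).1.set
        (pySiftupLoop heap pos childpos heap.length).2 v).Perm (heap.set pos v)) ∧
    (∀ j, ¬ anc root j →
      (pySiftupLoop heap pos childpos heap.length).1.getD j 0 = heap.getD j 0) ∧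
    HeapBelowX (pySiftupLoop heap pos childpos heap.length).1 heap.length root
      (pySiftupLoop heap pos childpos heap.length).2 ∧
    (root < (pySiftupLoop heap pos childpos heap.length).2 →
      ∀ c, pyPar c = (pySiftupLoop heap pos childpos heap.length).2 → 0 < c →
        c < heap.length →
        (pySiftupLoop heap pos childpos heap.length).1.getD
          (pyPar (pySiftupLoop heap pos childpos heap.length).2) 0 ≤
          (pySiftupLoop heap pos childpos heap.length).1.getD c 0) := by
  induction d generalizing heap pos childpos with
  | zero =>
    exact siftupLoop_exit heap root pos childpos (by omega) hlen hchild hanc Ka Kb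
  | succ d ih =>
    by_cases hc : childpos < heap.length
    · -- one loop step: the chosen (smaller) child moves up, the hole moves to it
      set c := if childpos + 1 < heap.length ∧
          ¬ heap.getD childpos 0 < heap.getD (childpos + 1) 0
        then childpos + 1 else childpos with hcdef
      have hrange : childpos ≤ c ∧ c < heap.length := by
        rw [hcdef]; split_ifs with h
        · exact ⟨by omega, h.1⟩
        · exact ⟨le_refl _, hc⟩
      have hparc : pyPar c = pos := by
        have : c = childpos ∨ c = childpos + 1 := by
          rw [hcdef]; split_ifs <;> simp
        unfold pyPar; omega
      have hposc : pos < c := by omega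
      have hroot_le : root ≤ pos := anc_le hanc
      -- the chosen child is minimal among the (at most two) children of pos
      have hmin : ∀ s, pyPar s = pos → 0 < s → s < heap.length →
          heap.getD c 0 ≤ heap.getD s 0 := by
        intro s hs h0s hsn
        have hs2 : s = childpos ∨ s = childpos + 1 := by unfold pyPar at hs; omega
        rw [hcdef]; split_ifs with h
        · rcases hs2 with rfl | rfl
          · omega
          · exact le_refl _
        · rcases hs2 with rfl | rfl
          · exact le_refl _
          · rcases (not_and_or.mp h) with h1 | h1
            · omega
            · rw [not_not] at h1; omega
      have hunf : pySiftupLoop heap pos childpos heap.length =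
          pySiftupLoop (heap.set pos (heap.getD c 0)) c (2 * c + 1) heap.length := by
        conv_lhs => rw [pySiftupLoop]
        simp only [dif_pos hc]
        rw [← hcdef]
      have hancc : anc root c := anc_child hanc hparc
      have Ka' : HeapBelowX (heap.set pos (heap.getD c 0))
          (heap.set pos (heap.getD c 0)).length root c := by
        intro j h0 hjn hjroot hjc hparj hancj
        simp only [List.length_set] at hjn
        by_cases hjpos : j = pos
        · subst hjpos
          have hrlt : root < j := lt_of_le_of_ne hroot_le (Ne.symm hjroot)
          have hppj : pyPar j ≠ j := by have := pyPar_lt h0; omega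
          rw [getD_set_self _ hlen, getD_set_ne _ (Ne.symm hppj)]
          exact Kb hrlt c hparc (by omega) hrange.2
        · by_cases hpj : pyPar j = pos
          · rw [hpj, getD_set_self _ hlen, getD_set_ne _ (Ne.symm hjpos)]
            exact hmin j hpj h0 hjn
          · rw [getD_set_ne _ (fun h => hpj h.symm), getD_set_ne _ (Ne.symm hjpos)]
            exact Ka j h0 hjn hjroot hjpos hpj hancj
      have Kb' : root < c → ∀ s, pyPar s = c → 0 < s →
          s < (heap.set pos (heap.getD c 0)).length →
          (heap.set pos (heap.getD c 0)).getD (pyPar c) 0 ≤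
            (heap.set pos (heap.getD c 0)).getD s 0 := by
        intro _ s hs h0s hsn
        simp only [List.length_set] at hsn
        have hsc : c < s := hs ▸ pyPar_lt h0s
        rw [hparc, getD_set_self _ hlen, getD_set_ne _ (by omega)]
        have hKa := Ka s h0s hsn (by omega) (by omega) (by rw [hs]; omega) (anc_child hancc hs)
        rw [hs] at hKa
        exact hKa
      obtain ⟨l1, l2, l3, l4, l5, l6, l7, l8⟩ :=
        ih (heap.set pos (heap.getD c 0)) c (2 * c + 1)
          (by simp only [List.length_set]; omega) (by simp only [List.length_set]; omega)
          rfl hancc Ka' Kb'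
      rw [List.length_set] at l1 l2 l3 l4 l5 l6 l7 l8
      rw [hunf]
      refine ⟨l1, l2, l3, l4, ?_, ?_, l7, l8⟩
      · intro v
        exact (l5 v).trans (set_move_perm heap pos c v (by omega) hlen hrange.2)
      · intro j hj
        rw [l6 j hj, getD_set_ne _ (fun h => hj (by rw [← h]; exact hanc))]
    · exact siftupLoop_exit heap root pos childpos hc hlen hchild hanc Ka Kb


-- spec of heapq._siftup: permutes the list, touches only the subtree of `root`,
-- and establishes heap order on that subtree
theorem siftup_spec (heap : List Int) (root : Nat) (hr : root < heap.length)
    (Ka : HeapBelowX heap heap.length root root) :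
    (pySiftup heap root).length = heap.length ∧
    (pySiftup heap root).Perm heap ∧
    (∀ j, ¬ anc root j → (pySiftup heap root).getD j 0 = heap.getD j 0) ∧
    HeapBelow (pySiftup heap root) heap.length root := by
  obtain ⟨u1, u2, u3, u4, u5, u6, u7, u8⟩ :=
    siftupLoop_spec heap.length heap root root (2 * root + 1) (by omega) hr rfl
      (anc_refl root) Ka (fun h => absurd h (lt_irrefl root))
  unfold pySiftup
  dsimp only
  set r := pySiftupLoop heap root (2 * root + 1) heap.length with hr2
  set h1 := r.1.set r.2 (heap.getD root 0) with hh1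
  have hlen1 : h1.length = heap.length := by rw [hh1]; simp only [List.length_set]; exact u1
  have Ha1 : HeapBelowX h1 h1.length root r.2 := by
    intro j h0 hjn hjroot hjr2 hparj hancj
    rw [hlen1] at hjn
    rw [hh1, getD_set_ne _ (Ne.symm hjr2), getD_set_ne _ (Ne.symm hparj)]
    exact u7 j h0 hjn hjroot hjr2 hparj hancj
  have Hc11 : ∀ c, pyPar c = r.2 → 0 < c → c < h1.length → h1.getD r.2 0 ≤ h1.getD c 0 := by
    intro c hcp h0 hcn
    rw [hlen1] at hcn
    exfalso; unfold pyPar at hcp; omega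
  have Hc21 : root < r.2 → ∀ c, pyPar c = r.2 → 0 < c → c < h1.length →
      h1.getD (pyPar r.2) 0 ≤ h1.getD c 0 := by
    intro _ c hcp h0 hcn
    rw [hlen1] at hcn
    exfalso; unfold pyPar at hcp; omega
  obtain ⟨s1, s2, s3, s4⟩ := siftdown_spec h1 root r.2 (by omega) u3 Ha1 Hc11 Hc21
  refine ⟨by rw [s1, hlen1], ?_, ?_, by rw [hlen1] at s4; exact s4⟩
  · refine s2.trans ?_
    have hp := u5 (heap.getD root 0)
    rw [set_getD_self hr] at hp
    exact hp
  · intro j hj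
    rw [s3 j hj, hh1, getD_set_ne _ (fun h => hj (by rw [← h]; exact u3)), u6 j hj]

-- heapify's loop: processing roots m-1, …, 0 turns "every edge with parent ≥ m is ordered"
-- into a full heap, by a permutation
theorem heapify_loop_spec (m : Nat) (h : List Int) (hm : 2 * m ≤ h.length)
    (hInv : InvH h h.length m) :
    ((List.range m).reverse.foldl (fun acc i => pySiftup acc i) h).length = h.length ∧
    ((List.range m).reverse.foldl (fun acc i => pySiftup acc i) h).Perm h ∧
    InvH ((List.range m).reverse.foldl (fun acc i => pySiftup acc i) h) h.length 0 := by
  induction m generalizing h with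
  | zero =>
    exact ⟨by simp, by simp, by simpa using hInv⟩
  | succ m ih =>
    have hfold : (List.range (m + 1)).reverse.foldl (fun acc i => pySiftup acc i) h =
        (List.range m).reverse.foldl (fun acc i => pySiftup acc i) (pySiftup h m) := by
      rw [List.range_succ, List.reverse_append]
      rfl
    have hr : m < h.length := by omega
    have Ka : HeapBelowX h h.length m m := by
      intro j h0 hjn hjroot hjm hparj hancj
      have h1 : m ≤ pyPar j := anc_le (anc_par hancj hjroot)
      exact hInv j h0 hjn (by omega)
    obtain ⟨e1, e2, e3, e4⟩ := siftup_spec h m hr Ka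
    have hInv' : InvH (pySiftup h m) (pySiftup h m).length m := by
      rw [e1]
      intro j h0 hjn hge
      by_cases hancj : anc m j
      · have hjm : j ≠ m := by have := pyPar_lt h0; omega
        exact e4 j h0 hjn hjm hancj
      · have hnp : ¬ anc m (pyPar j) := fun hp => hancj (anc_child hp rfl)
        rw [e3 j hancj, e3 _ hnp]
        have hpm : pyPar j ≠ m := fun he => hnp (he ▸ anc_refl m)
        exact hInv j h0 hjn (by omega)
    obtain ⟨f1, f2, f3⟩ := ih (pySiftup h m) (by omega) hInv'
    rw [e1] at f1 f3
    rw [hfold]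
    exact ⟨f1, f2.trans e2, f3⟩

-- spec of heapq.heapify: a permutation of the input satisfying the heap invariant
theorem heapify_spec (x : List Int) :
    (pyHeapify x).length = x.length ∧ (pyHeapify x).Perm x ∧ IsHeap (pyHeapify x) := by
  unfold pyHeapify
  have hInv : InvH x x.length (x.length / 2) := by
    intro j h0 hjn hge
    exfalso; unfold pyPar at hge; omega
  obtain ⟨e1, e2, e3⟩ := heapify_loop_spec (x.length / 2) x (by omega) hInv
  exact ⟨e1, e2, by unfold IsHeap; rw [e1]; exact e3⟩

-- in a heap, the root is a minimum
theorem root_min (h : List Int) (hh : IsHeap h) :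
    ∀ j, j < h.length → h.getD 0 0 ≤ h.getD j 0 := by
  intro j
  induction j using Nat.strong_induction_on with
  | _ j ihj =>
    intro hjn
    rcases Nat.eq_zero_or_pos j with h0 | h0
    · subst h0; exact le_refl _
    · have h1 := ihj (pyPar j) (pyPar_lt h0) (lt_trans (pyPar_lt h0) hjn)
      have h2 := hh j h0 hjn (Nat.zero_le _)
      omega

-- spec of heapq.heappush
theorem heappush_spec (h : List Int) (x : Int) (hh : IsHeap h) :
    (pyHeappush h x).length = h.length + 1 ∧
    (pyHeappush h x).Perm (x :: h) ∧ IsHeap (pyHeappush h x) := by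
  unfold pyHeappush
  have hlen : h.length < (h ++ [x]).length := by simp
  have Ha : HeapBelowX (h ++ [x]) (h ++ [x]).length 0 h.length := by
    intro j h0 hjn hjroot hjpos hparj hancj
    simp only [List.length_append, List.length_cons, List.length_nil] at hjn
    have hj : j < h.length := by omega
    have hp : pyPar j < h.length := lt_trans (pyPar_lt h0) hj
    rw [getD_append_left hj, getD_append_left hp]
    exact hh j h0 hj (Nat.zero_le _)
  have Hc1 : ∀ c, pyPar c = h.length → 0 < c → c < (h ++ [x]).length →
      (h ++ [x]).getD h.length 0 ≤ (h ++ [x]).getD c 0 := by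
    intro c hc h0 hcn
    exfalso
    simp only [List.length_append, List.length_cons, List.length_nil] at hcn
    unfold pyPar at hc; omega
  have Hc2 : 0 < h.length → ∀ c, pyPar c = h.length → 0 < c → c < (h ++ [x]).length →
      (h ++ [x]).getD (pyPar h.length) 0 ≤ (h ++ [x]).getD c 0 := by
    intro _ c hc h0 hcn
    exfalso
    simp only [List.length_append, List.length_cons, List.length_nil] at hcn
    unfold pyPar at hc; omega
  obtain ⟨s1, s2, s3, s4⟩ := siftdown_spec (h ++ [x]) 0 h.length hlen (anc_zero _) Ha Hc1 Hc2
  refine ⟨by rw [s1]; simp, ?_, ?_⟩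
  · refine s2.trans ?_
    have hpm := List.perm_middle (a := x) (l₁ := h) (l₂ := ([] : List Int))
    simp only [List.append_nil] at hpm
    exact hpm
  · unfold IsHeap
    rw [s1]
    intro j h0 hjn _
    exact s4 j h0 hjn (by omega) (anc_zero j)

-- spec of heapq.heappop on a nonempty heap: returns the minimum and a heap of the rest
theorem heappop_spec (h : List Int) (hh : IsHeap h) (hne : h ≠ []) :
    (pyHeappop h).2.length + 1 = h.length ∧
    h.Perm ((pyHeappop h).1 :: (pyHeappop h).2) ∧
    IsHeap (pyHeappop h).2 ∧
    (∀ j, j < h.length → (pyHeappop h).1 ≤ h.getD j 0) := by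
  have hdec : h.dropLast ++ [h.getLast hne] = h := List.dropLast_concat_getLast hne
  have hL : h.getLast?.getD 0 = h.getLast hne := by rw [List.getLast?_eq_some_getLast hne]; rfl
  unfold pyHeappop
  dsimp only
  by_cases hrest : h.dropLast.isEmpty
  · rw [if_pos hrest]
    rw [List.isEmpty_iff] at hrest
    have hlen1 : h.length = 1 := by
      have h2 := congrArg List.length hdec
      rw [hrest] at h2
      simpa using h2.symm
    obtain ⟨a, rfl⟩ : ∃ a, h = [a] := by
      match h, hlen1 with
      | [a], _ => exact ⟨a, rfl⟩
    refine ⟨by simp [hrest], by simp [hrest], ?_, ?_⟩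
    · intro j h0 hjn _
      exact absurd hjn (by simp [hrest])
    · intro j hjn
      simp only [List.length_cons, List.length_nil] at hjn
      interval_cases j
      simp
  · rw [if_neg hrest]
    dsimp only
    have hrest' : h.dropLast ≠ [] := by simpa [List.isEmpty_iff] using hrest
    have hrl : 0 < h.dropLast.length := List.length_pos_iff.mpr hrest'
    have hlh : h.dropLast.length + 1 = h.length := by
      have := congrArg List.length hdec
      simpa using this
    have Ka : HeapBelowX (h.dropLast.set 0 (h.getLast?.getD 0))
        (h.dropLast.set 0 (h.getLast?.getD 0)).length 0 0 := by
      intro j h0 hjn hjroot hjpos hparj hancj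
      simp only [List.length_set] at hjn
      have hpj : 0 < pyPar j ∨ pyPar j ≠ 0 → pyPar j ≠ 0 := fun _ => hparj
      rw [getD_set_ne _ (Ne.symm hjpos), getD_set_ne _ (Ne.symm hparj)]
      have hgj : h.dropLast.getD j 0 = h.getD j 0 := by
        rw [← hdec, getD_append_left hjn, hdec]
      have hgp : h.dropLast.getD (pyPar j) 0 = h.getD (pyPar j) 0 := by
        rw [← hdec, getD_append_left (lt_trans (pyPar_lt h0) hjn), hdec]
      rw [hgj, hgp]
      exact hh j h0 (by omega) (Nat.zero_le _)
    obtain ⟨e1, e2, e3, e4⟩ :=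
      siftup_spec (h.dropLast.set 0 (h.getLast?.getD 0)) 0 (by simp only [List.length_set]; omega) Ka
    simp only [List.length_set] at e1
    have hg0 : h.dropLast.getD 0 0 = h.getD 0 0 := by
      rw [← hdec, getD_append_left hrl, hdec]
    refine ⟨by omega, ?_, ?_, ?_⟩
    · refine List.Perm.symm ?_
      have p1 : (h.dropLast.getD 0 0 :: pySiftup (h.dropLast.set 0 (h.getLast?.getD 0)) 0).Perm
          (h.dropLast.getD 0 0 :: h.dropLast.set 0 (h.getLast?.getD 0)) := e2.cons _
      have p2 : (h.dropLast.getD 0 0 :: h.dropLast.set 0 (h.getLast?.getD 0)).Perm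
          (h.dropLast.getD 0 0 :: h.getLast?.getD 0 :: h.dropLast.eraseIdx 0) :=
        (set_perm_eraseIdx _ 0 _ hrl).cons _
      have p3 : (h.dropLast.getD 0 0 :: h.getLast?.getD 0 :: h.dropLast.eraseIdx 0).Perm
          (h.getLast?.getD 0 :: h.dropLast.getD 0 0 :: h.dropLast.eraseIdx 0) :=
        List.Perm.swap _ _ _
      have p4 : (h.getLast?.getD 0 :: h.dropLast.getD 0 0 :: h.dropLast.eraseIdx 0).Perm
          (h.getLast?.getD 0 :: h.dropLast) := (perm_getD_eraseIdx h.dropLast 0 hrl).symm.cons _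
      have p5 : (h.getLast?.getD 0 :: h.dropLast).Perm h := by
        rw [hL]
        have hp : (h.dropLast ++ [h.getLast hne]).Perm (h.getLast hne :: h.dropLast) := by
          have hpm := List.perm_middle (a := h.getLast hne) (l₁ := h.dropLast)
            (l₂ := ([] : List Int))
          simp only [List.append_nil] at hpm
          exact hpm
        rw [hdec] at hp
        exact hp.symm
      exact (((p1.trans p2).trans p3).trans p4).trans p5
    · unfold IsHeap
      rw [e1]
      intro j h0 hjn _
      exact e4 j h0 (by simp only [List.length_set]; exact hjn) (by omega) (anc_zero j)
    · intro j hjn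
      rw [hg0]
      exact root_min h hh j hjn


theorem le_of_forall_getD {e : Int} {h : List Int}
    (hall : ∀ j, j < h.length → e ≤ h.getD j 0) : ∀ y ∈ h, e ≤ y := by
  intro y hy
  obtain ⟨i, hi, rfl⟩ := List.mem_iff_getElem.mp hy
  have := hall i hi
  rwa [List.getD_eq_getElem h 0 hi] at this

-- one loop iteration: popping the max from the negated min-heap and pushing the replacement
-- agrees with B's linear max-scan-and-overwrite step, through the multiset relation
theorem step_agree (heap vals : List Int) (s t : Int)
    (hheap : IsHeap heap) (hperm : heap.Perm (vals.map (fun v => -v)))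
    (hne : vals ≠ []) :
    IsHeap (pyStepA (heap, s)).1 ∧
    (pyStepA (heap, s)).1.Perm ((pyStepB (vals, t)).1.map (fun v => -v)) ∧
    (pyStepB (vals, t)).1 ≠ [] ∧
    (pyStepA (heap, s)).2 = s + (PySem.List.max? vals (fun y => y)).getD 0 ∧
    (pyStepB (vals, t)).2 = t + (PySem.List.max? vals (fun y => y)).getD 0 := by
  obtain ⟨m', hmx⟩ : ∃ m', PySem.List.max? vals (fun y => y) = some m' := by
    cases hmx : PySem.List.max? vals (fun y => y) with
    | none => exact absurd ((PySem.List.max?_eq_none_iff vals (fun y => y)).mp hmx) hne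
    | some m' => exact ⟨m', rfl⟩
  have hmmem : m' ∈ vals := PySem.List.max?_mem hmx
  have hmmax : ∀ y ∈ vals, y ≤ m' := by
    have := PySem.List.max?_isMax hmx
    simpa using this
  have hlenm : heap.length = vals.length := by simpa using hperm.length_eq
  have hvpos : 0 < vals.length := List.length_pos_iff.mpr hne
  have hhne : heap ≠ [] := by
    intro h0
    rw [h0] at hlenm
    simp at hlenm
    omega
  obtain ⟨q1, q2, q3, q4⟩ := heappop_spec heap hheap hhne
  -- the popped element is the negated maximum
  have hemem : (pyHeappop heap).1 ∈ heap := q2.mem_iff.mpr (List.mem_cons_self)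
  have he : (pyHeappop heap).1 = -m' := by
    have h1 : (pyHeappop heap).1 ≤ -m' := by
      refine le_of_forall_getD q4 (-m') ?_
      rw [hperm.mem_iff]
      exact List.mem_map.mpr ⟨m', hmmem, rfl⟩
    have h2 : -m' ≤ (pyHeappop heap).1 := by
      have := hperm.mem_iff.mp hemem
      obtain ⟨v, hv, hveq⟩ := List.mem_map.mp this
      have := hmmax v hv
      omega
    omega
  -- the scan index is a real index of the maximum
  obtain ⟨i, hidx⟩ : ∃ i, PySem.List.index? vals m' = some i :=
    Option.isSome_iff_exists.mp ((PySem.List.index?_isSome_iff vals m').mpr hmmem)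
  obtain ⟨hilt, hival, _⟩ := PySem.List.getElem_of_index?_eq_some hidx
  have hgetD : vals.getD i 0 = m' := by rw [List.getD_eq_getElem vals 0 hilt, hival]
  -- rest of the heap matches vals with the max removed
  have hrest : (pyHeappop heap).2.Perm ((vals.eraseIdx i).map (fun v => -v)) := by
    have hv1 : vals.Perm (m' :: vals.eraseIdx i) := by
      have := perm_getD_eraseIdx vals i hilt
      rwa [hgetD] at this
    have hv2 : (vals.map (fun v => -v)).Perm
        ((pyHeappop heap).1 :: (vals.eraseIdx i).map (fun v => -v)) := by
      have := hv1.map (fun v => -v)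
      simpa [he] using this
    have := (q2.symm.trans hperm).trans hv2
    exact this.cons_inv
  obtain ⟨r1, r2, r3⟩ := heappush_spec (pyHeappop heap).2
    (-(PySem.Int.floordiv (|(pyHeappop heap).1| + 2) 3)) q3
  unfold pyStepA pyStepB
  dsimp only
  rw [hmx]
  dsimp only [Option.getD_some]
  rw [hidx]
  dsimp only [Option.getD_some]
  refine ⟨r3, ?_, ?_, by rw [he]; ring, rfl⟩
  · refine r2.trans ?_
    have hset := (set_perm_eraseIdx vals i (PySem.Int.floordiv (|m'| + 2) 3) hilt).map
      (fun v => -v)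
    refine List.Perm.trans ?_ hset.symm
    simp only [List.map_cons]
    rw [he]
    simpa [abs_neg] using hrest.cons (-(PySem.Int.floordiv (|m'| + 2) 3))
  · intro h0
    have hlen0 : (vals.set i (PySem.Int.floordiv (|m'| + 2) 3)).length = 0 := by rw [h0]; rfl
    rw [List.length_set] at hlen0
    omega

-- the two loop bodies, iterated from related states with equal scores, give equal scores
theorem loop_agree (L : List Int) (heap vals : List Int) (s : Int)
    (hheap : IsHeap heap) (hperm : heap.Perm (vals.map (fun v => -v))) (hne : vals ≠ []) :
    (L.foldl (fun st _ => pyStepA st) (heap, s)).2 =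
      (L.foldl (fun st _ => pyStepB st) (vals, s)).2 := by
  induction L generalizing heap vals s with
  | nil => rfl
  | cons x L ih =>
    simp only [List.foldl_cons]
    obtain ⟨a1, a2, a3, a4, a5⟩ := step_agree heap vals s s hheap hperm hne
    have hA : pyStepA (heap, s) =
        ((pyStepA (heap, s)).1, s + (PySem.List.max? vals (fun y => y)).getD 0) := by
      rw [← a4]
    have hB : pyStepB (vals, s) =
        ((pyStepB (vals, s)).1, s + (PySem.List.max? vals (fun y => y)).getD 0) := by
      rw [← a5]
    rw [hA, hB]
    exact ih _ _ _ a1 a2 a3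

-- ===== VERDICT (by name: the statement is the Claim_ definition above) =====
theorem maxKelements_spec : Claim_equal_maxKelements := by
  unfold Claim_equal_maxKelements
  intro nums k _ hpre
  unfold Spec_maxKelements maxKelements maxKelements_alt
  by_cases hk : k ≤ 0
  · rw [PySem.List.pyRange_one_eq_nil hk]
    rfl
  · have hnums : nums ≠ [] := hpre.resolve_right hk
    obtain ⟨g1, g2, g3⟩ := heapify_spec (nums.map (fun num => -num))
    exact loop_agree _ _ nums 0 g3 g2 hnums
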